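-- pv_equiv track=rewrite | github.com/asantos2000/master-data-structures-algorithms | misc/conta_loop.py | o_nlogn
-- ===== SOURCE A (Python) =====
-- def o_nlogn(n):
--     c = 0
--     i = 1
--     while i <= n:
--         j = 1
--         while j <= n:
--             c = c + 1
--             j = j + i
--         i = i + 1
--     return c
-- ===== SOURCE B (Python) =====
-- def o_nlogn(n):
--     # inner loop on step i performs (n-1)//i + 1 iterations; sum those in one pass
--     if n <= 0:
--         return 0
--     m = n - 1
--     return n + sum(m // i for i in range(1, n + 1))
-- ===== Notes on version B (the rewrite author's own statement) =====
-- stated objective: faster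
-- what changed: Replaces the nested while-loops with a single pass that uses the closed form (n-1)//i + 1 for the inner loop's iteration count, summing n + sum((n-1)//i for i in 1..n).
import Mathlib
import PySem

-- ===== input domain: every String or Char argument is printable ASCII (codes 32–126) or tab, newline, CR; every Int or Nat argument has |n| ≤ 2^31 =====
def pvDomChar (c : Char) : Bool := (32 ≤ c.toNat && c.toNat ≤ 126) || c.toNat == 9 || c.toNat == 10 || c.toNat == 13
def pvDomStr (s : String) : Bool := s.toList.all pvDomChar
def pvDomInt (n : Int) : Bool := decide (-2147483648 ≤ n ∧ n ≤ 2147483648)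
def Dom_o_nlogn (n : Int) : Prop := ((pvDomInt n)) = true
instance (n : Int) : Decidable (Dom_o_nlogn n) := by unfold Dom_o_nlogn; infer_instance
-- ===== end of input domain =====

-- B replaces the nested counting loops by one pass using the closed form (n-1)//i + 1 for the inner count (faster).

-- B replaces the nested counting loops by one pass using the closed form (n-1)//i + 1 for the inner count (faster).

-- ===== PORT A =====
-- inner 'while j <= n' loop; the Nat fuel only makes the recursion total (it is always sufficient)
def o_nlogn_inner (n i : Int) : Nat → Int → Int → Int
  | 0, _, c => c
  | fuel + 1, j, c => if j ≤ n then o_nlogn_inner n i fuel (j + i) (c + 1) else c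

-- outer 'while i <= n' loop
def o_nlogn_outer (n : Int) : Nat → Int → Int → Int
  | 0, _, c => c
  | fuel + 1, i, c =>
      if i ≤ n then o_nlogn_outer n fuel (i + 1) (o_nlogn_inner n i n.toNat 1 c) else c

def o_nlogn (n : Int) : Int := o_nlogn_outer n n.toNat 1 0

-- ===== PORT B =====
def o_nlogn_alt (n : Int) : Int :=
  if n ≤ 0 then 0
  else
    n + (PySem.List.pyRange 1 (n + 1) 1).foldl
          (fun acc i => acc + PySem.Int.floordiv (n - 1) i) 0

-- ===== PRECONDITION & SPEC =====
def Spec_o_nlogn (n : Int) (out : Int) : Prop := out = o_nlogn_alt n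
instance (n : Int) (out : Int) : Decidable (Spec_o_nlogn n out) := by unfold Spec_o_nlogn; infer_instance

-- ===== CLAIM (what is proved, stated in full; the proofs are below) =====
def Claim_equal_o_nlogn : Prop := ∀ (n : Int), Dom_o_nlogn n → Spec_o_nlogn n (o_nlogn n)

-- ===== LEMMAS AND PROOFS =====

-- floor-division shift: fd (a + b) b = fd a b + 1 (for 0 < b)
theorem fdiv_shift (a b : Int) (hb : 0 < b) :
    PySem.Int.floordiv (a + b) b = PySem.Int.floordiv a b + 1 := by
  have h := (PySem.Int.floordiv_eq_iff_of_pos (a := a) (b := b)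
      (q := PySem.Int.floordiv a b) hb).mp rfl
  exact (PySem.Int.floordiv_eq_iff_of_pos hb).mpr (by constructor <;> nlinarith [h.1, h.2])

theorem fdiv_small (a b : Int) (hb : 0 < b) (h0 : 0 ≤ a) (h1 : a < b) :
    PySem.Int.floordiv a b = 0 := by
  exact (PySem.Int.floordiv_eq_iff_of_pos hb).mpr (by constructor <;> nlinarith)

-- pulling the start value out of an accumulating fold
theorem foldl_shift (g : Int → Int) :
    ∀ (l : List Int) (c : Int),
      l.foldl (fun acc k => acc + g k) c = c + l.foldl (fun acc k => acc + g k) 0 := by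
  intro l
  induction l with
  | nil => intro c; simp
  | cons x xs ih =>
    intro c
    simp only [List.foldl_cons]
    rw [ih (c + g x), ih (0 + g x)]
    ring

-- the inner loop is the identity once j exceeds n (any fuel)
theorem inner_exit (n i : Int) (j c : Int) (hj : n < j) :
    ∀ fuel, o_nlogn_inner n i fuel j c = c := by
  intro fuel
  cases fuel with
  | zero => rfl
  | succ f => simp [o_nlogn_inner, not_le.mpr hj]

-- closed form for A's inner while-loop, with sufficient fuel
theorem inner_closed (n i : Int) (hi : 0 < i) :
    ∀ (fuel : Nat) (j c : Int), j ≤ n → (n - j).toNat < fuel →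
      o_nlogn_inner n i fuel j c = c + PySem.Int.floordiv (n - j) i + 1 := by
  intro fuel
  induction fuel with
  | zero => intro j c hj hf; omega
  | succ f ih =>
    intro j c hj hf
    rw [o_nlogn_inner, if_pos hj]
    by_cases h : j + i ≤ n
    · rw [ih (j + i) (c + 1) h (by omega)]
      have : PySem.Int.floordiv (n - j) i = PySem.Int.floordiv (n - (j + i)) i + 1 := by
        have := fdiv_shift (n - (j + i)) i hi
        rw [← this]; ring_nf
      omega
    · rw [inner_exit n i (j + i) (c + 1) (by omega)]
      have : PySem.Int.floordiv (n - j) i = 0 := fdiv_small _ _ hi (by omega) (by omega)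
      omega

-- closed form for A's outer while-loop, with sufficient fuel
theorem outer_closed (n : Int) :
    ∀ (fuel : Nat) (i c : Int), 1 ≤ i → (n + 1 - i).toNat ≤ fuel →
      o_nlogn_outer n fuel i c =
        c + (PySem.List.pyRange i (n + 1) 1).foldl
              (fun acc k => acc + (1 + PySem.Int.floordiv (n - 1) k)) 0 := by
  intro fuel
  induction fuel with
  | zero =>
    intro i c hi hf
    rw [PySem.List.pyRange_one_eq_nil (by omega)]
    simp [o_nlogn_outer]
  | succ f ih =>
    intro i c hi hf
    rw [o_nlogn_outer]
    by_cases h : i ≤ n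
    · rw [if_pos h,
        inner_closed n i (by omega) n.toNat 1 c (by omega) (by omega),
        ih (i + 1) _ (by omega) (by omega),
        PySem.List.pyRange_one_cons (by omega : i < n + 1)]
      simp only [List.foldl_cons]
      rw [foldl_shift _ _ (0 + (1 + PySem.Int.floordiv (n - 1) i))]
      omega
    · rw [if_neg h, PySem.List.pyRange_one_eq_nil (by omega)]
      simp
-- splitting the per-step "+1" out of the fold
theorem foldl_one_add (f : Int → Int) :
    ∀ (l : List Int) (c : Int),
      l.foldl (fun acc k => acc + (1 + f k)) c =
        c + l.length + l.foldl (fun acc k => acc + f k) 0 := by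
  intro l
  induction l with
  | nil => intro c; simp
  | cons x xs ih =>
    intro c
    simp only [List.foldl_cons, List.length_cons]
    rw [ih (c + (1 + f x)), foldl_shift f xs (0 + f x)]
    push_cast
    ring

-- ===== VERDICT (by name: the statement is the Claim_ definition above) =====
theorem o_nlogn_spec : Claim_equal_o_nlogn := by
  intro n _
  unfold Spec_o_nlogn o_nlogn o_nlogn_alt
  rw [outer_closed n n.toNat 1 0 le_rfl (by omega)]
  by_cases hn : n ≤ 0
  · rw [if_pos hn, PySem.List.pyRange_one_eq_nil (by omega)]
    simp
  · rw [if_neg hn, foldl_one_add]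
    have hlen := PySem.List.length_pyRange_one 1 (n + 1)
    omega
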